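-- pv_equiv track=rewrite | github.com/JustAnAverageGuy/ideal-enigma | practice/archives/csoc23/week_1/binary_search/O_Mikasa.py | solve
-- ===== SOURCE A (Python) =====
-- def high_set_bit(n):
--     c = -1
--     while n:
--         n >>= 1
--         c += 1
--     return c
--
-- def solve(n, m):
--     if m < n:
--         return 0
--     '''brute'''
--     # i = 1
--     # while True:
--     #     if (i ^ n) > m:
--     #         return i
--     #     i += 1
--     i = 0
--     m0 = m
--     n0 = n
--     while (i ^ n) <= m:
--         if m0 == 0:
--             return i +1
--         k = high_set_bit(m0)
--         l = high_set_bit(n0)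
--         if l < k:
--             i  |= (1 << k)
--         if l == k:
--             n0 ^= (1 << k)
--
--         if l > k:
--             break
--         m0 ^= (1 << k)
--
--     return i
-- ===== SOURCE B (Python) =====
-- def solve(n, m):
--     if m < n:
--         return 0
--     # minimal i with (i ^ n) > m: minimize t = i ^ n over t > m directly.
--     # For each bit position p with bit p of m clear, the smallest t > m whose
--     # highest bit differing from m is p keeps m's bits above p, sets bit p,
--     # and copies n's bits below p (zeroing the xor there); take the best i = t ^ n.
--     best = None
--     for p in range(m.bit_length() + 1):
--         if not (m >> p) & 1:
--             t = ((m >> (p + 1)) << (p + 1)) | (1 << p) | (n & ((1 << p) - 1))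
--             cand = t ^ n
--             if best is None or cand < best:
--                 best = cand
--     return best
-- ===== Notes on version B (the rewrite author's own statement) =====
-- stated objective: alternative
-- what changed: Instead of A's iterative high-bit scan that repeatedly strips the top set bit of m and n, B computes the answer as a one-pass minimum over bit positions p where m's bit is 0 of the closed-form candidate ((m with bits<=p replaced by 1<<p | low bits of n) XOR n).
-- intended difference: On inputs with 0 <= n <= m where every set bit of n is set in m and n has a set bit inside m's trailing block of 1-bits, A returns (m XOR n)+1 even though ((m XOR n)+1) XOR n <= m, while B returns the true smallest i with (i XOR n) > m; B's value is the one the brute-force comment in A specifies. — e.g. on solve(1, 1): A returns 1, B returns 2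
-- outside the precondition, e.g. on solve(-1, 0): A returns 1, B returns -2
import Mathlib
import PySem

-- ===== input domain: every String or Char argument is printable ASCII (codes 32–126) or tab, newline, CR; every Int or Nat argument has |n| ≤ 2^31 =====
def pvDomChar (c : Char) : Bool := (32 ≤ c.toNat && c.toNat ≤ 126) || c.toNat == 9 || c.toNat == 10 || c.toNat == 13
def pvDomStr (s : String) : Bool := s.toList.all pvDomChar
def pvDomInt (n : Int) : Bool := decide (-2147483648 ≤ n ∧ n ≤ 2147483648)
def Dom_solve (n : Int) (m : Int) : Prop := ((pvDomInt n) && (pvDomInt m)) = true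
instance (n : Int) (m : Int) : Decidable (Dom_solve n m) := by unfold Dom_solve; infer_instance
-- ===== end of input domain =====

-- B replaces A's iterative high-set-bit scan by a one-pass minimum over closed-form
-- candidates, one per zero bit of m ("alternative" objective; A is wrong on D_solve below).

-- ===== PORT A =====
-- `high_set_bit`: Python's `c = -1; while n: n >>= 1; c += 1; return c`.  The fuel only
-- makes the recursion structural: x halvings reach 0 in at most x steps, so fuel = x is
-- never exhausted; on negative ints Python diverges (excluded by Pre_solve).
def high_set_bit_aux : Nat → Nat → Int → Int
  | 0, _, c => c
  | fuel + 1, x, c => if x = 0 then c else high_set_bit_aux fuel (x / 2) (c + 1)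

def high_set_bit (x : Nat) : Int := high_set_bit_aux x x (-1)

-- The `while (i ^ n) <= m` loop of A, step for step.  `fuel` only makes the recursion
-- structural: every Python iteration strictly decreases m0 (its top set bit is cleared),
-- so fuel m0+1 is never exhausted on the inputs the claim covers (proved below).
def loopA (n m : Nat) : Nat → Nat → Nat → Nat → Nat
  | 0, i, _, _ => i
  | fuel + 1, i, m0, n0 =>
    if (i ^^^ n) ≤ m then
      if m0 = 0 then i + 1
      else
        let k := high_set_bit m0
        let l := high_set_bit n0
        let i' := if l < k then i ||| 2 ^ k.toNat else i        -- i |= (1 << k)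
        let n0' := if l = k then n0 ^^^ 2 ^ k.toNat else n0     -- n0 ^= (1 << k)
        if l > k then i'                                        -- break (i' = i here)
        else loopA n m fuel i' (m0 ^^^ 2 ^ k.toNat) n0'         -- m0 ^= (1 << k)
    else i

-- Past the `m < n` guard, every input Pre_solve admits has n, m ≥ 0, where computing on
-- Nat is exact (for negative n ≤ m Python's loop diverges; those inputs are outside Pre_).
def solve (n : Int) (m : Int) : Int :=
  if m < n then 0
  else ((loopA n.toNat m.toNat (m.toNat + 1) 0 m.toNat n.toNat : Nat) : Int)

-- ===== PORT B =====
-- Python's int.bit_length(), written out (fuel as above; exact on Nat)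
def bit_length_aux : Nat → Nat → Nat → Nat
  | 0, _, c => c
  | fuel + 1, x, c => if x = 0 then c else bit_length_aux fuel (x / 2) (c + 1)

def bit_length (x : Nat) : Nat := bit_length_aux x x 0

-- candidate for position p: ((m >> (p+1)) << (p+1)) | (1 << p) | (n & ((1 << p) - 1)), xor n
def candB (n m p : Nat) : Nat :=
  ((((m >>> (p + 1)) <<< (p + 1)) ||| (1 <<< p)) ||| (n &&& ((1 <<< p) - 1))) ^^^ n

-- the `for p in range(...)` loop of Source B with its running `best`
def foldB (n m : Nat) : List Nat → Option Nat → Option Nat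
  | [], best => best
  | p :: ps, best =>
      if (m >>> p) &&& 1 = 0 then
        match best with
        | none => foldB n m ps (some (candB n m p))
        | some b => foldB n m ps (some (if candB n m p < b then candB n m p else b))
      else
        foldB n m ps best

-- As in solve, past the guard the computation is placed on Nat, exact on every input
-- Pre_solve admits.
def solve_alt (n : Int) (m : Int) : Int :=
  if m < n then 0
  else
    match foldB n.toNat m.toNat (List.range (bit_length m.toNat + 1)) none with
    | some b => (b : Int)
    | none => 0   -- unreachable: p = bit_length m always passes the zero-bit test

-- ===== PRECONDITION & SPEC =====
-- Pre_ excludes exactly the inputs with n ≤ m and n < 0: there Python's high_set_bit loops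
-- forever on a negative int (no value is returned) except on the single line m = 0 > n,
-- a corner outside the problem's domain where no i with (i XOR n) > m exists at all and
-- A's returned 1 and B's returned value are equally arbitrary.
def Pre_solve (n : Int) (m : Int) : Prop := m < n ∨ (0 ≤ n ∧ 0 ≤ m)
instance (n : Int) (m : Int) : Decidable (Pre_solve n m) := by unfold Pre_solve; infer_instance

def pvWitness_solve : Int × Int := (6, 9)

-- On inputs with 0 ≤ n ≤ m where every set bit of n is set in m and n has a set bit inside
-- m's trailing block of 1-bits, A returns (m XOR n) + 1 even though ((m XOR n)+1) XOR n ≤ m,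
-- while B returns the smallest i with (i XOR n) > m — the value A's own brute-force comment
-- specifies, so B's value is the intended one.
def D_solve (n : Int) (m : Int) : Prop :=
  0 ≤ n ∧ 0 ≤ m ∧ n.toNat &&& m.toNat = n.toNat ∧
    n.toNat &&& ((m.toNat ^^^ (m.toNat + 1)) / 2) ≠ 0
instance (n : Int) (m : Int) : Decidable (D_solve n m) := by unfold D_solve; infer_instance

def Spec_solve (n : Int) (m : Int) (out : Int) : Prop := ¬ D_solve n m → out = solve_alt n m
instance (n : Int) (m : Int) (out : Int) : Decidable (Spec_solve n m out) := by
  unfold Spec_solve; infer_instance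

def pvDiffWitness_solve : Int × Int := (1, 1)
def pvDiffWitnessOut_solve : Int × Int := (1, 2)

-- ===== CLAIM (what is proved, stated in full; the proofs are below) =====
def Claim_unchanged_solve : Prop :=
  ∀ (n : Int) (m : Int), Dom_solve n m → Pre_solve n m → Spec_solve n m (solve n m)
def Claim_changed_solve : Prop :=
  Dom_solve (pvDiffWitness_solve.1) (pvDiffWitness_solve.2) ∧
  Pre_solve (pvDiffWitness_solve.1) (pvDiffWitness_solve.2) ∧
  D_solve (pvDiffWitness_solve.1) (pvDiffWitness_solve.2) ∧
  solve (pvDiffWitness_solve.1) (pvDiffWitness_solve.2) = pvDiffWitnessOut_solve.1 ∧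
  solve_alt (pvDiffWitness_solve.1) (pvDiffWitness_solve.2) = pvDiffWitnessOut_solve.2 ∧
  pvDiffWitnessOut_solve.1 ≠ pvDiffWitnessOut_solve.2
def Claim_exact_solve : Prop :=
  ∀ (n : Int) (m : Int), Dom_solve n m → Pre_solve n m → D_solve n m →
    solve n m ≠ solve_alt n m

-- ===== LEMMAS AND PROOFS =====

-- the defining specification both programs are related to: least j with (j XOR n) > m
lemma exF (n m : Nat) : ∃ j, m < j ^^^ n :=
  ⟨2 ^ Nat.size m ^^^ n, by rw [Nat.xor_xor_cancel_right]; exact Nat.lt_size_self m⟩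

def Fmin (n m : Nat) : Nat := Nat.find (exF n m)

-- ---------- generic bit-block toolbox ----------

lemma bool_xor_false {x y : Bool} (h : (x ^^ y) = false) : x = y := by
  cases x <;> cases y <;> simp_all

lemma split_block (x s : Nat) : x = x / 2 ^ s * 2 ^ s + x % 2 ^ s := by
  have e := Nat.div_add_mod x (2 ^ s)
  rw [Nat.mul_comm] at e
  omega

lemma blockBit (a c s q : Nat) (hc : c < 2 ^ s) :
    (a * 2 ^ s + c).testBit q = if q < s then c.testBit q else a.testBit (q - s) := by
  have e : (a * 2 ^ s + c) % 2 ^ s = c := by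
    rw [Nat.mul_comm, Nat.mul_add_mod]; exact Nat.mod_eq_of_lt hc
  have e2 : (a * 2 ^ s + c) >>> s = a := by
    rw [Nat.shiftRight_eq_div_pow]
    have e3 : a * 2 ^ s + c = c + 2 ^ s * a := by ring
    rw [e3, Nat.add_mul_div_left _ _ (pow_pos (by norm_num : (0:ℕ) < 2) s),
      Nat.div_eq_of_lt hc]
    omega
  split
  · rename_i h
    conv_rhs => rw [← e]
    rw [Nat.testBit_mod_two_pow]
    simp [h]
  · rename_i h
    conv_rhs => rw [← e2]
    rw [Nat.testBit_shiftRight]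
    congr 1
    omega

lemma xorBlock (s a b c d : Nat) (hc : c < 2 ^ s) (hd : d < 2 ^ s) :
    (a * 2 ^ s + c) ^^^ (b * 2 ^ s + d) = (a ^^^ b) * 2 ^ s + (c ^^^ d) := by
  apply Nat.eq_of_testBit_eq; intro q
  rw [Nat.testBit_xor, blockBit _ _ _ _ hc, blockBit _ _ _ _ hd,
    blockBit _ _ _ _ (Nat.xor_lt_two_pow hc hd)]
  split <;> simp [Nat.testBit_xor]

lemma andBlock (s a b c d : Nat) (hc : c < 2 ^ s) (hd : d < 2 ^ s) :
    (a * 2 ^ s + c) &&& (b * 2 ^ s + d) = (a &&& b) * 2 ^ s + (c &&& d) := by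
  apply Nat.eq_of_testBit_eq; intro q
  rw [Nat.testBit_land, blockBit _ _ _ _ hc, blockBit _ _ _ _ hd,
    blockBit _ _ _ _ (Nat.lt_of_le_of_lt Nat.and_le_right hd)]
  split <;> simp

lemma xor_le_add : ∀ a b : Nat, a ^^^ b ≤ a + b := by
  intro a
  induction a using Nat.strong_induction_on with
  | _ a ih =>
    intro b
    rcases Nat.eq_zero_or_pos a with h0 | h0
    · simp [h0]
    · have hd : a / 2 < a := Nat.div_lt_self h0 one_lt_two
      have e : a ^^^ b = (a / 2 ^^^ b / 2) * 2 + (a % 2 ^^^ b % 2) := by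
        calc a ^^^ b = (a / 2 * 2 ^ 1 + a % 2) ^^^ (b / 2 * 2 ^ 1 + b % 2) := by
              rw [pow_one]; congr 1 <;> omega
          _ = (a / 2 ^^^ b / 2) * 2 ^ 1 + (a % 2 ^^^ b % 2) :=
              xorBlock 1 (a / 2) (b / 2) (a % 2) (b % 2) (by omega) (by omega)
          _ = (a / 2 ^^^ b / 2) * 2 + (a % 2 ^^^ b % 2) := by rw [pow_one]
      have hlow : a % 2 ^^^ b % 2 ≤ a % 2 + b % 2 := by
        rcases Nat.mod_two_eq_zero_or_one a with h1 | h1 <;>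
          rcases Nat.mod_two_eq_zero_or_one b with h2 | h2 <;> simp [h1, h2]
      have hih := ih (a / 2) hd (b / 2)
      omega

lemma xor_disjoint_add : ∀ a b : Nat, a &&& b = 0 → a ^^^ b = a + b := by
  intro a
  induction a using Nat.strong_induction_on with
  | _ a ih =>
    intro b hab
    rcases Nat.eq_zero_or_pos a with h0 | h0
    · simp [h0]
    · have hd : a / 2 < a := Nat.div_lt_self h0 one_lt_two
      have ea : a = a / 2 * 2 ^ 1 + a % 2 := by rw [pow_one]; omega
      have eb : b = b / 2 * 2 ^ 1 + b % 2 := by rw [pow_one]; omega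
      have hAnd : (a / 2 &&& b / 2) * 2 ^ 1 + (a % 2 &&& b % 2) = 0 := by
        rw [← andBlock 1 (a / 2) (b / 2) (a % 2) (b % 2) (by omega) (by omega),
          ← ea, ← eb, hab]
      have hhi : a / 2 &&& b / 2 = 0 := by
        have := Nat.and_le_right (n := a % 2) (m := b % 2)
        omega
      have hlo : a % 2 &&& b % 2 = 0 := by omega
      have hXor : a ^^^ b = (a / 2 ^^^ b / 2) * 2 ^ 1 + (a % 2 ^^^ b % 2) := by
        conv_lhs => rw [ea, eb]
        exact xorBlock 1 (a / 2) (b / 2) (a % 2) (b % 2) (by omega) (by omega)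
      have hlow : a % 2 ^^^ b % 2 = a % 2 + b % 2 := by
        rcases Nat.mod_two_eq_zero_or_one a with h1 | h1 <;>
          rcases Nat.mod_two_eq_zero_or_one b with h2 | h2 <;>
            simp [h1, h2] at hlo ⊢
      have hih := ih (a / 2) hd (b / 2) hhi
      rw [hXor, hih, hlow, pow_one]
      omega

lemma bit0_iff (m p : Nat) : (m >>> p) &&& 1 = 0 ↔ m.testBit p = false := by
  simp [Nat.testBit, Nat.and_one_is_mod]

lemma testBit_ge_size {m q : Nat} (h : Nat.size m ≤ q) : m.testBit q = false :=
  Nat.testBit_lt_two_pow (Nat.lt_of_lt_of_le (Nat.lt_size_self m)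
    (Nat.pow_le_pow_right (by norm_num) h))

lemma ge_two_pow_of_testBit {t p : Nat} (h : t.testBit p = true) : 2 ^ p ≤ t := by
  by_contra hc
  rw [Nat.testBit_lt_two_pow (by omega)] at h
  exact Bool.noConfusion h

lemma le_of_bits (x y : Nat)
    (h : ∀ q, x.testBit q ≠ y.testBit q → (∀ r, q < r → x.testBit r = y.testBit r) →
      x.testBit q = false) : x ≤ y := by
  rcases eq_or_ne x y with he | hne
  · exact he.le
  · have hd : x ^^^ y ≠ 0 := fun h0 => hne (Nat.xor_eq_zero_iff.mp h0)
    obtain ⟨q, hq1, hq2⟩ := Nat.exists_most_significant_bit hd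
    have hdiff : x.testBit q ≠ y.testBit q := by
      rw [Nat.testBit_xor] at hq1
      intro he'; rw [he'] at hq1; simp at hq1
    have hagree : ∀ r, q < r → x.testBit r = y.testBit r := by
      intro r hr
      have h' := hq2 r hr
      rw [Nat.testBit_xor] at h'
      exact bool_xor_false h'
    have hx := h q hdiff hagree
    have hy : y.testBit q = true := by
      cases hyq : y.testBit q
      · rw [hx, hyq] at hdiff; exact absurd rfl hdiff
      · rfl
    exact (Nat.lt_of_testBit q hx hy hagree).le

-- splitting a division by 2^k through a coarser block 2^s
lemma div_pow_split (x s k : Nat) (h : k ≤ s) :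
    x / 2 ^ k = (x / 2 ^ s) * 2 ^ (s - k) + (x % 2 ^ s) / 2 ^ k := by
  have hss : (2:ℕ) ^ s = 2 ^ (s - k) * 2 ^ k := by
    rw [← pow_add]; congr 1; omega
  have e : x = x % 2 ^ s + 2 ^ k * ((x / 2 ^ s) * 2 ^ (s - k)) := by
    have h1 := split_block x s
    calc x = x / 2 ^ s * 2 ^ s + x % 2 ^ s := h1
      _ = x % 2 ^ s + 2 ^ k * (x / 2 ^ s * 2 ^ (s - k)) := by rw [hss]; ring
  conv_lhs => rw [e]
  rw [Nat.add_mul_div_left _ _ (pow_pos (by norm_num : (0:ℕ) < 2) k)]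
  omega

-- clearing the top set bit: x ^^^ 2^k = x - 2^k = x % 2^k when 2^k ≤ x < 2^(k+1)
lemma xor_top (x k : Nat) (h1 : 2 ^ k ≤ x) (h2 : x < 2 ^ (k + 1)) :
    x ^^^ 2 ^ k = x - 2 ^ k := by
  have hps : (2:ℕ) ^ (k + 1) = 2 * 2 ^ k := by ring
  have hx : x ^^^ 2 ^ k = (1 ^^^ 1) * 2 ^ k + ((x - 2 ^ k) ^^^ 0) := by
    have := xorBlock k 1 1 (x - 2 ^ k) 0 (by omega) (by omega)
    calc x ^^^ 2 ^ k = (1 * 2 ^ k + (x - 2 ^ k)) ^^^ (1 * 2 ^ k + 0) := by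
          congr 1 <;> omega
      _ = (1 ^^^ 1) * 2 ^ k + ((x - 2 ^ k) ^^^ 0) := this
  simpa using hx

lemma mod_top (x k : Nat) (h1 : 2 ^ k ≤ x) (h2 : x < 2 ^ (k + 1)) :
    x % 2 ^ k = x - 2 ^ k := by
  have hps : (2:ℕ) ^ (k + 1) = 2 * 2 ^ k := by ring
  have e1 : x = 2 ^ k + (x - 2 ^ k) := by omega
  conv_lhs => rw [e1]
  rw [Nat.add_mod_left]
  exact Nat.mod_eq_of_lt (by omega)

lemma lor_pow (y s k : Nat) (h : k < s) : (y * 2 ^ s) ||| 2 ^ k = y * 2 ^ s + 2 ^ k := by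
  have hks : (2:ℕ) ^ k < 2 ^ s := Nat.pow_lt_pow_right (by norm_num) h
  apply Nat.eq_of_testBit_eq
  intro q
  have h1 : (y * 2 ^ s + 2 ^ k).testBit q
      = if q < s then (2 ^ k).testBit q else y.testBit (q - s) := blockBit y (2 ^ k) s q hks
  have h2 : (y * 2 ^ s).testBit q = if q < s then false else y.testBit (q - s) := by
    have h3 := blockBit y 0 s q (pow_pos (by norm_num : (0:ℕ) < 2) s)
    simpa using h3
  rw [Nat.testBit_lor, h1, h2]
  by_cases hq : q < s
  · simp [hq]
  · simp [hq, Nat.testBit_two_pow]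
    intro h'
    exact absurd h' (by omega)

-- the two fueled scans compute Nat.size
lemma size_div_two (x : Nat) (h0 : x ≠ 0) : Nat.size x = Nat.size (x / 2) + 1 := by
  have h1 := Nat.lt_size_self x
  have h2 := Nat.lt_size_self (x / 2)
  have h4 : 1 ≤ Nat.size x := by
    rcases Nat.eq_zero_or_pos (Nat.size x) with hz | hz
    · exact absurd (Nat.size_eq_zero.mp hz) h0
    · omega
  have h3 : Nat.size (x / 2) ≤ Nat.size x - 1 := by
    rw [Nat.size_le]
    have h5 : (2:ℕ) ^ (Nat.size x - 1 + 1) = 2 ^ Nat.size x := by congr 1; omega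
    rw [pow_succ] at h5
    omega
  have h6 : Nat.size x ≤ Nat.size (x / 2) + 1 := by
    rw [Nat.size_le, pow_succ]
    omega
  omega

lemma bit_length_aux_eq : ∀ fuel x c, x ≤ fuel → bit_length_aux fuel x c = c + Nat.size x := by
  intro fuel
  induction fuel with
  | zero =>
    intro x c h
    have hx : x = 0 := by omega
    subst hx
    simp [bit_length_aux, Nat.size_zero]
  | succ f ih =>
    intro x c h
    by_cases h0 : x = 0
    · subst h0
      simp [bit_length_aux, Nat.size_zero]
    · have hd : x / 2 < x := Nat.div_lt_self (Nat.pos_of_ne_zero h0) one_lt_two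
      rw [show bit_length_aux (f + 1) x c
          = if x = 0 then c else bit_length_aux f (x / 2) (c + 1) from rfl,
        if_neg h0, ih (x / 2) (c + 1) (by omega), size_div_two x h0]
      omega

lemma bit_length_eq (x : Nat) : bit_length x = Nat.size x := by
  unfold bit_length
  rw [bit_length_aux_eq x x 0 (le_refl x)]
  omega

lemma high_set_bit_aux_eq : ∀ fuel x c, x ≤ fuel →
    high_set_bit_aux fuel x c = c + (Nat.size x : Int) := by
  intro fuel
  induction fuel with
  | zero =>
    intro x c h
    have hx : x = 0 := by omega
    subst hx
    simp [high_set_bit_aux, Nat.size_zero]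
  | succ f ih =>
    intro x c h
    by_cases h0 : x = 0
    · subst h0
      simp [high_set_bit_aux, Nat.size_zero]
    · have hd : x / 2 < x := Nat.div_lt_self (Nat.pos_of_ne_zero h0) one_lt_two
      rw [show high_set_bit_aux (f + 1) x c
          = if x = 0 then c else high_set_bit_aux f (x / 2) (c + 1) from rfl,
        if_neg h0, ih (x / 2) (c + 1) (by omega), size_div_two x h0]
      push_cast
      ring

lemma high_set_bit_eq (x : Nat) : high_set_bit x = (Nat.size x : Int) - 1 := by
  unfold high_set_bit
  rw [high_set_bit_aux_eq x x (-1) (le_refl x)]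
  ring

-- ---------- B-side: foldB computes Fmin ----------

lemma tB_testBit (a b p q : Nat) :
    ((((b >>> (p + 1)) <<< (p + 1)) ||| (1 <<< p)) ||| (a &&& ((1 <<< p) - 1))).testBit q
      = if q < p then a.testBit q else if q = p then true else b.testBit q := by
  rw [Nat.one_shiftLeft, Nat.testBit_lor, Nat.testBit_lor, Nat.testBit_land,
    Nat.testBit_shiftLeft, Nat.testBit_two_pow, Nat.testBit_two_pow_sub_one,
    Nat.testBit_shiftRight]
  rcases Nat.lt_trichotomy q p with h | h | h
  · rw [if_pos h, decide_eq_false (by omega : ¬ q ≥ p + 1),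
      decide_eq_false (by omega : ¬ p = q), decide_eq_true h]
    simp
  · subst h
    rw [if_neg (by omega), if_pos rfl, decide_eq_false (by omega : ¬ q ≥ q + 1),
      decide_eq_true (rfl : q = q), decide_eq_false (by omega : ¬ q < q)]
    simp
  · rw [if_neg (by omega), if_neg (by omega),
      (by omega : p + 1 + (q - (p + 1)) = q), decide_eq_true (by omega : q ≥ p + 1),
      decide_eq_false (by omega : ¬ p = q), decide_eq_false (by omega : ¬ q < p)]
    simp

lemma candB_testBit (a b p q : Nat) :
    (candB a b p).testBit q =
      ((if q < p then a.testBit q else if q = p then true else b.testBit q) ^^ a.testBit q) := by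
  unfold candB
  rw [Nat.testBit_xor, tB_testBit]

lemma candB_sat (a b p : Nat) (hp : (b >>> p) &&& 1 = 0) : b < candB a b p ^^^ a := by
  have hbp : b.testBit p = false := (bit0_iff b p).mp hp
  have ht : candB a b p ^^^ a
      = (((b >>> (p + 1)) <<< (p + 1)) ||| (1 <<< p)) ||| (a &&& ((1 <<< p) - 1)) := by
    unfold candB; exact Nat.xor_xor_cancel_right _ a
  rw [ht]
  refine Nat.lt_of_testBit p hbp ?_ ?_
  · rw [tB_testBit]; simp
  · intro j hj
    rw [tB_testBit, if_neg (by omega : ¬ j < p), if_neg (by omega : ¬ j = p)]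

lemma candB_dominates (a b : Nat) (hab : a ≤ b) (j : Nat) (hj : b < j ^^^ a) :
    ∃ p, p < Nat.size b + 1 ∧ (b >>> p) &&& 1 = 0 ∧ candB a b p ≤ j := by
  set t := j ^^^ a with htdef
  have hjt : t ^^^ a = j := Nat.xor_xor_cancel_right j a
  have htb : t ≠ b := by omega
  have hd : t ^^^ b ≠ 0 := fun h0 => htb (Nat.xor_eq_zero_iff.mp h0)
  obtain ⟨p, hp1, hp2⟩ := Nat.exists_most_significant_bit hd
  have hagree : ∀ r, p < r → t.testBit r = b.testBit r := by
    intro r hr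
    have h' := hp2 r hr
    rw [Nat.testBit_xor] at h'
    exact bool_xor_false h'
  have hdiff : t.testBit p ≠ b.testBit p := by
    rw [Nat.testBit_xor] at hp1
    intro he; rw [he] at hp1; simp at hp1
  have hbp : b.testBit p = false ∧ t.testBit p = true := by
    cases htp : t.testBit p
    · cases hbq : b.testBit p
      · rw [htp, hbq] at hdiff; exact absurd rfl hdiff
      · exact absurd (Nat.lt_of_testBit p htp hbq hagree) (by omega)
    · cases hbq : b.testBit p
      · exact ⟨rfl, rfl⟩
      · rw [htp, hbq] at hdiff; exact absurd rfl hdiff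
  by_cases hps : p ≤ Nat.size b
  · refine ⟨p, by omega, (bit0_iff b p).mpr hbp.1, ?_⟩
    have hle2 : candB a b p ≤ t ^^^ a := by
      apply le_of_bits
      intro q hq _
      simp only [candB_testBit, Nat.testBit_xor] at hq ⊢
      rcases Nat.lt_trichotomy q p with h | h | h
      · simp [h]
      · subst h
        rw [if_neg (lt_irrefl q), if_pos rfl, hbp.2] at hq
        exact absurd rfl hq
      · rw [if_neg (by omega), if_neg (by omega), ← hagree q h] at hq
        exact absurd rfl hq
    rwa [hjt] at hle2
  · -- t's top differing bit lies above size b: the candidate at p₀ = size b is 2^(size b) ≤ j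
    refine ⟨Nat.size b, by omega, (bit0_iff b _).mpr (testBit_ge_size (le_refl _)), ?_⟩
    have haL : a < 2 ^ Nat.size b := Nat.lt_of_le_of_lt hab (Nat.lt_size_self b)
    have hsa : Nat.size a ≤ Nat.size b := Nat.size_le_size hab
    have hcand : candB a b (Nat.size b) = 2 ^ Nat.size b := by
      apply Nat.eq_of_testBit_eq
      intro q
      rw [candB_testBit, Nat.testBit_two_pow]
      rcases Nat.lt_trichotomy q (Nat.size b) with h | h | h
      · rw [if_pos h, decide_eq_false (by omega : ¬ Nat.size b = q)]
        simp
      · subst h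
        rw [if_neg (by omega), if_pos rfl, Nat.testBit_lt_two_pow haL,
          decide_eq_true (rfl : Nat.size b = Nat.size b)]
        simp
      · rw [if_neg (by omega), if_neg (by omega), testBit_ge_size (le_of_lt h),
          testBit_ge_size (show Nat.size a ≤ q by omega),
          decide_eq_false (by omega : ¬ Nat.size b = q)]
        simp
    rw [hcand]
    have hpt : 2 ^ p ≤ t := ge_two_pow_of_testBit hbp.2
    have hpL : 2 ^ (Nat.size b + 1) ≤ 2 ^ p := Nat.pow_le_pow_right (by norm_num) (by omega)
    have hle : t ≤ j + a := by
      calc t = (t ^^^ a) ^^^ a := (Nat.xor_xor_cancel_right t a).symm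
        _ ≤ (t ^^^ a) + a := xor_le_add _ _
        _ = j + a := by rw [hjt]
    have h2L : 2 ^ (Nat.size b) + 2 ^ (Nat.size b) = 2 ^ (Nat.size b + 1) := by ring
    omega

lemma foldB_char (a b : Nat) : ∀ (ps : List Nat) (best : Option Nat) (r : Nat),
    foldB a b ps best = some r →
    ((best = some r ∨ ∃ p ∈ ps, (b >>> p) &&& 1 = 0 ∧ r = candB a b p) ∧
     (∀ x, best = some x → r ≤ x) ∧
     (∀ p ∈ ps, (b >>> p) &&& 1 = 0 → r ≤ candB a b p)) := by
  intro ps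
  induction ps with
  | nil =>
    intro best r h
    simp only [foldB] at h
    subst h
    refine ⟨Or.inl rfl, ?_, ?_⟩
    · intro x hx
      injection hx with hx
      omega
    · intro p hp
      simp at hp
  | cons p ps ih =>
    intro best r h
    simp only [foldB] at h
    by_cases hp : (b >>> p) &&& 1 = 0
    · rw [if_pos hp] at h
      cases best with
      | none =>
        obtain ⟨h1, h2, h3⟩ := ih (some (candB a b p)) r h
        have hrc : r ≤ candB a b p := h2 _ rfl
        refine ⟨?_, fun x hx => absurd hx (by simp), ?_⟩
        · rcases h1 with h1 | ⟨q, hq1, hq2, hq3⟩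
          · exact Or.inr ⟨p, by simp, hp, by injection h1 with h1; omega⟩
          · exact Or.inr ⟨q, by simp [hq1], hq2, hq3⟩
        · intro q hq hqbit
          rcases List.mem_cons.mp hq with h' | h'
          · subst h'; exact hrc
          · exact h3 q h' hqbit
      | some x =>
        obtain ⟨h1, h2, h3⟩ := ih _ r h
        have hrm : r ≤ if candB a b p < x then candB a b p else x := h2 _ rfl
        have hrx : r ≤ x := by split at hrm <;> omega
        have hrc : r ≤ candB a b p := by split at hrm <;> omega
        refine ⟨?_, fun y hy => by injection hy with hy; omega, ?_⟩
        · rcases h1 with h1 | ⟨q, hq1, hq2, hq3⟩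
          · injection h1 with h1
            by_cases hcx : candB a b p < x
            · rw [if_pos hcx] at h1
              exact Or.inr ⟨p, by simp, hp, h1.symm⟩
            · rw [if_neg hcx] at h1
              exact Or.inl (by rw [h1])
          · exact Or.inr ⟨q, by simp [hq1], hq2, hq3⟩
        · intro q hq hqbit
          rcases List.mem_cons.mp hq with h' | h'
          · subst h'; exact hrc
          · exact h3 q h' hqbit
    · rw [if_neg hp] at h
      obtain ⟨h1, h2, h3⟩ := ih best r h
      refine ⟨?_, h2, ?_⟩
      · rcases h1 with h1 | ⟨q, hq1, hq2, hq3⟩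
        · exact Or.inl h1
        · exact Or.inr ⟨q, by simp [hq1], hq2, hq3⟩
      · intro q hq hqbit
        rcases List.mem_cons.mp hq with h' | h'
        · subst h'; exact absurd hqbit hp
        · exact h3 q h' hqbit

lemma foldB_some (a b : Nat) : ∀ (ps : List Nat) (best : Option Nat),
    (best ≠ none ∨ ∃ p ∈ ps, (b >>> p) &&& 1 = 0) → ∃ r, foldB a b ps best = some r := by
  intro ps
  induction ps with
  | nil =>
    intro best h
    rcases h with h | ⟨p, hp, _⟩
    · cases best with
      | none => exact absurd rfl h
      | some x => exact ⟨x, rfl⟩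
    · simp at hp
  | cons p ps ih =>
    intro best h
    simp only [foldB]
    by_cases hp : (b >>> p) &&& 1 = 0
    · rw [if_pos hp]
      cases best with
      | none => exact ih _ (Or.inl (by simp))
      | some x => exact ih _ (Or.inl (by simp))
    · rw [if_neg hp]
      apply ih
      rcases h with h | ⟨q, hq, hqbit⟩
      · exact Or.inl h
      · rcases List.mem_cons.mp hq with h' | h'
        · subst h'; exact absurd hqbit hp
        · exact Or.inr ⟨q, h', hqbit⟩

lemma foldB_correct (a b : Nat) (hab : a ≤ b) :
    foldB a b (List.range (Nat.size b + 1)) none = some (Fmin a b) := by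
  have hsz : (b >>> Nat.size b) &&& 1 = 0 := (bit0_iff b _).mpr (testBit_ge_size (le_refl _))
  obtain ⟨r, hr⟩ := foldB_some a b (List.range (Nat.size b + 1)) none
    (Or.inr ⟨Nat.size b, List.mem_range.mpr (by omega), hsz⟩)
  obtain ⟨h1, _, h3⟩ := foldB_char a b _ _ _ hr
  rcases h1 with h1 | ⟨p, _, hpbit, hpr⟩
  · exact absurd h1 (by simp)
  · have hFr : Fmin a b ≤ r := by
      apply Nat.find_le
      rw [hpr]
      exact candB_sat a b p hpbit
    obtain ⟨q, hq1, hq2, hq3⟩ := candB_dominates a b hab (Fmin a b) (Nat.find_spec (exF a b))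
    have hrF : r ≤ Fmin a b := le_trans (h3 q (List.mem_range.mpr hq1) hq2) hq3
    rw [hr]
    congr 1
    omega

-- ---------- A-side bookkeeping ----------

lemma mod_pow_and (x y s : Nat) : (x &&& y) % 2 ^ s = x % 2 ^ s &&& y % 2 ^ s := by
  apply Nat.eq_of_testBit_eq
  intro q
  simp only [Nat.testBit_mod_two_pow, Nat.testBit_land]
  by_cases h : q < s <;> simp [h]

-- anything whose high block is below the high block of b xors with a below b's block
lemma below_i_lt (a b s j : Nat)
    (hsum : (b / 2 ^ s ^^^ a / 2 ^ s) + a / 2 ^ s = b / 2 ^ s)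
    (hj : j / 2 ^ s < b / 2 ^ s ^^^ a / 2 ^ s) :
    j ^^^ a < (b / 2 ^ s) * 2 ^ s := by
  have hpw : (0:ℕ) < 2 ^ s := pow_pos (by norm_num) s
  have hxa : j ^^^ a = (j / 2 ^ s ^^^ a / 2 ^ s) * 2 ^ s + (j % 2 ^ s ^^^ a % 2 ^ s) := by
    calc j ^^^ a = (j / 2 ^ s * 2 ^ s + j % 2 ^ s) ^^^ (a / 2 ^ s * 2 ^ s + a % 2 ^ s) := by
          rw [← split_block, ← split_block]
      _ = (j / 2 ^ s ^^^ a / 2 ^ s) * 2 ^ s + (j % 2 ^ s ^^^ a % 2 ^ s) :=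
          xorBlock s _ _ _ _ (Nat.mod_lt _ hpw) (Nat.mod_lt _ hpw)
  have hxle : j / 2 ^ s ^^^ a / 2 ^ s ≤ j / 2 ^ s + a / 2 ^ s := xor_le_add _ _
  have hhi : j / 2 ^ s ^^^ a / 2 ^ s < b / 2 ^ s := by omega
  have hlo : j % 2 ^ s ^^^ a % 2 ^ s < 2 ^ s :=
    Nat.xor_lt_two_pow (Nat.mod_lt _ hpw) (Nat.mod_lt _ hpw)
  calc j ^^^ a < (j / 2 ^ s ^^^ a / 2 ^ s) * 2 ^ s + 2 ^ s := by omega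
    _ = ((j / 2 ^ s ^^^ a / 2 ^ s) + 1) * 2 ^ s := by ring
    _ ≤ (b / 2 ^ s) * 2 ^ s := Nat.mul_le_mul_right _ (by omega)

-- the disjoint-sum fact used to compare high blocks
lemma hi_sum (a b s : Nat) (hsub : (a / 2 ^ s) &&& (b / 2 ^ s) = a / 2 ^ s) :
    (b / 2 ^ s ^^^ a / 2 ^ s) + a / 2 ^ s = b / 2 ^ s := by
  have hdisj : (b / 2 ^ s ^^^ a / 2 ^ s) &&& (a / 2 ^ s) = 0 := by
    rw [Nat.and_xor_distrib_right, Nat.and_self,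
      Nat.and_comm (b / 2 ^ s) (a / 2 ^ s), hsub, Nat.xor_self]
  have h1 := xor_disjoint_add _ _ hdisj
  have h2 : (b / 2 ^ s ^^^ a / 2 ^ s) ^^^ a / 2 ^ s = b / 2 ^ s :=
    Nat.xor_xor_cancel_right _ _
  omega

-- trailing-ones bookkeeping for the m0 = 0 exit
lemma exTO (b : Nat) : ∃ p, b.testBit p = false := ⟨Nat.size b, testBit_ge_size (le_refl _)⟩

lemma TO_lt (b q : Nat) (hq : q < Nat.find (exTO b)) : b.testBit q = true := by
  have h' := Nat.find_min (exTO b) hq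
  cases h : b.testBit q
  · exact absurd h h'
  · rfl

lemma TO_mod (b : Nat) : b % 2 ^ (Nat.find (exTO b) + 1) = 2 ^ (Nat.find (exTO b)) - 1 := by
  have hbc : b.testBit (Nat.find (exTO b)) = false := Nat.find_spec (exTO b)
  apply Nat.eq_of_testBit_eq
  intro q
  rw [Nat.testBit_mod_two_pow, Nat.testBit_two_pow_sub_one]
  rcases Nat.lt_trichotomy q (Nat.find (exTO b)) with h | h | h
  · rw [decide_eq_true (show q < Nat.find (exTO b) + 1 by omega), decide_eq_true h,
      TO_lt b q h]
    rfl
  · rw [h, hbc, decide_eq_false (lt_irrefl (Nat.find (exTO b))), Bool.and_false]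
  · rw [decide_eq_false (show ¬ q < Nat.find (exTO b) + 1 by omega),
      decide_eq_false (show ¬ q < Nat.find (exTO b) by omega), Bool.false_and]

lemma pred_xor_pow (c : Nat) : (2 ^ c - 1) ^^^ 2 ^ c = 2 ^ (c + 1) - 1 := by
  apply Nat.eq_of_testBit_eq
  intro q
  rw [Nat.testBit_xor, Nat.testBit_two_pow_sub_one, Nat.testBit_two_pow,
    Nat.testBit_two_pow_sub_one]
  rcases Nat.lt_trichotomy q c with h | h | h
  · rw [decide_eq_true h, decide_eq_false (show ¬ c = q by omega),
      decide_eq_true (show q < c + 1 by omega)]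
    rfl
  · subst h
    rw [decide_eq_false (lt_irrefl q), decide_eq_true (rfl : q = q),
      decide_eq_true (show q < q + 1 by omega)]
    rfl
  · rw [decide_eq_false (show ¬ q < c by omega), decide_eq_false (show ¬ c = q by omega),
      decide_eq_false (show ¬ q < c + 1 by omega)]
    rfl

lemma succpred_xor_pow (c : Nat) : (2 ^ (c + 1) - 1) ^^^ 2 ^ c = 2 ^ c - 1 := by
  apply Nat.eq_of_testBit_eq
  intro q
  rw [Nat.testBit_xor, Nat.testBit_two_pow_sub_one, Nat.testBit_two_pow,
    Nat.testBit_two_pow_sub_one]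
  rcases Nat.lt_trichotomy q c with h | h | h
  · rw [decide_eq_true (show q < c + 1 by omega), decide_eq_false (show ¬ c = q by omega),
      decide_eq_true h]
    rfl
  · subst h
    rw [decide_eq_true (show q < q + 1 by omega), decide_eq_true (rfl : q = q),
      decide_eq_false (lt_irrefl q)]
    rfl
  · rw [decide_eq_false (show ¬ q < c + 1 by omega),
      decide_eq_false (show ¬ c = q by omega), decide_eq_false (show ¬ q < c by omega)]
    rfl

lemma xor_succ (b : Nat) :
    b ^^^ (b + 1) = 2 ^ (Nat.find (exTO b) + 1) - 1 := by
  have hmod := TO_mod b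
  set c := Nat.find (exTO b) with hc
  have hpw : (0:ℕ) < 2 ^ c := pow_pos (by norm_num) c
  have hps : (2:ℕ) ^ (c + 1) = 2 * 2 ^ c := by ring
  have hb : b = b / 2 ^ (c + 1) * 2 ^ (c + 1) + (2 ^ c - 1) := by
    have h1 := split_block b (c + 1)
    omega
  have hb1 : b + 1 = b / 2 ^ (c + 1) * 2 ^ (c + 1) + 2 ^ c := by omega
  calc b ^^^ (b + 1)
      = (b / 2 ^ (c + 1) * 2 ^ (c + 1) + (2 ^ c - 1)) ^^^
        (b / 2 ^ (c + 1) * 2 ^ (c + 1) + 2 ^ c) := by rw [← hb, ← hb1]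
    _ = (b / 2 ^ (c + 1) ^^^ b / 2 ^ (c + 1)) * 2 ^ (c + 1) + ((2 ^ c - 1) ^^^ 2 ^ c) :=
        xorBlock (c + 1) _ _ _ _ (by omega) (by omega)
    _ = (2 ^ c - 1) ^^^ 2 ^ c := by rw [Nat.xor_self, Nat.zero_mul, Nat.zero_add]
    _ = 2 ^ (c + 1) - 1 := pred_xor_pow c

-- ===== the central loop invariant =====
lemma loopA_inv (a b : Nat)
    (hND : a &&& b = a → a &&& ((b ^^^ (b + 1)) / 2) = 0) :
    ∀ fuel s i m0 n0, m0 < fuel →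
      m0 = b % 2 ^ s → n0 = a % 2 ^ s →
      i = (b / 2 ^ s ^^^ a / 2 ^ s) * 2 ^ s →
      (a / 2 ^ s) &&& (b / 2 ^ s) = a / 2 ^ s →
      loopA a b fuel i m0 n0 = Fmin a b := by
  intro fuel
  induction fuel with
  | zero =>
    intro s i m0 n0 h1 _ _ _ _
    exact absurd h1 (Nat.not_lt_zero m0)
  | succ f ih =>
    intro s i m0 n0 hfuel hm0 hn0 hi hsubs
    have hpw : (0:ℕ) < 2 ^ s := pow_pos (by norm_num) s
    have hbm : b = b / 2 ^ s * 2 ^ s + m0 := by rw [hm0]; exact split_block b s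
    have ham : a = a / 2 ^ s * 2 ^ s + n0 := by rw [hn0]; exact split_block a s
    have hm0lt : m0 < 2 ^ s := by rw [hm0]; exact Nat.mod_lt _ hpw
    have hn0lt : n0 < 2 ^ s := by rw [hn0]; exact Nat.mod_lt _ hpw
    have hi0 : i = (b / 2 ^ s ^^^ a / 2 ^ s) * 2 ^ s + 0 := by omega
    have hixa : i ^^^ a = (b / 2 ^ s) * 2 ^ s + n0 := by
      calc i ^^^ a
          = ((b / 2 ^ s ^^^ a / 2 ^ s) * 2 ^ s + 0) ^^^ (a / 2 ^ s * 2 ^ s + n0) := by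
            rw [← hi0, ← ham]
        _ = ((b / 2 ^ s ^^^ a / 2 ^ s) ^^^ a / 2 ^ s) * 2 ^ s + (0 ^^^ n0) :=
            xorBlock s _ _ 0 n0 hpw hn0lt
        _ = (b / 2 ^ s) * 2 ^ s + n0 := by rw [Nat.xor_xor_cancel_right, Nat.zero_xor]
    have hsum := hi_sum a b s hsubs
    simp only [loopA]
    by_cases hcond : (i ^^^ a) ≤ b
    · rw [if_pos hcond]
      have hn0m0 : n0 ≤ m0 := by omega
      by_cases hm00 : m0 = 0
      · rw [if_pos hm00]
        have hn00 : n0 = 0 := by omega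
        have hb0 : b = b / 2 ^ s * 2 ^ s + 0 := by omega
        have ha0 : a = a / 2 ^ s * 2 ^ s + 0 := by omega
        have hsuball : a &&& b = a := by
          calc a &&& b = (a / 2 ^ s * 2 ^ s + 0) &&& (b / 2 ^ s * 2 ^ s + 0) := by
                rw [← ha0, ← hb0]
            _ = (a / 2 ^ s &&& b / 2 ^ s) * 2 ^ s + (0 &&& 0) :=
                andBlock s _ _ _ _ (by omega) (by omega)
            _ = a := by rw [hsubs]; simpa using ha0.symm
        have hnd := hND hsuball
        rw [xor_succ b] at hnd
        have hmodTO := TO_mod b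
        set c := Nat.find (exTO b) with hcdef
        have hbc : b.testBit c = false := Nat.find_spec (exTO b)
        have hpc : (0:ℕ) < 2 ^ c := pow_pos (by norm_num) c
        have hpcc : (2:ℕ) ^ (c + 1) = 2 * 2 ^ c := by ring
        have hdiv2 : ((2:ℕ) ^ (c + 1) - 1) / 2 = 2 ^ c - 1 := by omega
        rw [hdiv2] at hnd
        have halow : ∀ q, q < c → a.testBit q = false := by
          intro q hq
          have h0 : (a &&& (2 ^ c - 1)).testBit q = false := by
            rw [hnd]; exact Nat.zero_testBit q
          rw [Nat.testBit_land, Nat.testBit_two_pow_sub_one] at h0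
          simpa [hq] using h0
        have hac : a.testBit c = false := by
          have h0 : (a &&& b).testBit c = a.testBit c := by rw [hsuball]
          rw [Nat.testBit_land, hbc, Bool.and_false] at h0
          exact h0.symm
        have hamod : a % 2 ^ (c + 1) = 0 := by
          apply Nat.eq_of_testBit_eq
          intro q
          rw [Nat.testBit_mod_two_pow, Nat.zero_testBit]
          by_cases hq : q < c + 1
          · rcases Nat.lt_or_ge q c with h | h
            · rw [halow q h, Bool.and_false]
            · have hqc : q = c := by omega
              rw [hqc, hac, Bool.and_false]
          · rw [decide_eq_false hq, Bool.false_and]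
        have hbB : b = b / 2 ^ (c + 1) * 2 ^ (c + 1) + (2 ^ c - 1) := by
          have := split_block b (c + 1)
          omega
        have haA : a = a / 2 ^ (c + 1) * 2 ^ (c + 1) + 0 := by
          have := split_block a (c + 1)
          omega
        have hia : i = b ^^^ a := by
          have hba : b ^^^ a = (b / 2 ^ s ^^^ a / 2 ^ s) * 2 ^ s + 0 := by
            calc b ^^^ a = (b / 2 ^ s * 2 ^ s + 0) ^^^ (a / 2 ^ s * 2 ^ s + 0) := by
                  rw [← hb0, ← ha0]
              _ = (b / 2 ^ s ^^^ a / 2 ^ s) * 2 ^ s + (0 ^^^ 0) :=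
                  xorBlock s _ _ _ _ (by omega) (by omega)
              _ = (b / 2 ^ s ^^^ a / 2 ^ s) * 2 ^ s + 0 := by simp
          omega
        have hxba : b ^^^ a
            = (b / 2 ^ (c + 1) ^^^ a / 2 ^ (c + 1)) * 2 ^ (c + 1) + (2 ^ c - 1) := by
          calc b ^^^ a
              = (b / 2 ^ (c + 1) * 2 ^ (c + 1) + (2 ^ c - 1)) ^^^
                (a / 2 ^ (c + 1) * 2 ^ (c + 1) + 0) := by rw [← hbB, ← haA]
            _ = (b / 2 ^ (c + 1) ^^^ a / 2 ^ (c + 1)) * 2 ^ (c + 1) + ((2 ^ c - 1) ^^^ 0) :=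
                xorBlock (c + 1) _ _ _ _ (by omega) (by omega)
            _ = _ := by rw [Nat.xor_zero]
        have hi1 : i + 1 = (b / 2 ^ (c + 1) ^^^ a / 2 ^ (c + 1)) * 2 ^ (c + 1) + 2 ^ c := by
          omega
        have hP : b < (i + 1) ^^^ a := by
          have e : (i + 1) ^^^ a
              = ((b / 2 ^ (c + 1) ^^^ a / 2 ^ (c + 1)) ^^^ a / 2 ^ (c + 1)) * 2 ^ (c + 1)
                + (2 ^ c ^^^ 0) := by
            calc (i + 1) ^^^ a
                = ((b / 2 ^ (c + 1) ^^^ a / 2 ^ (c + 1)) * 2 ^ (c + 1) + 2 ^ c) ^^^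
                  (a / 2 ^ (c + 1) * 2 ^ (c + 1) + 0) := by rw [← hi1, ← haA]
              _ = _ := xorBlock (c + 1) _ _ _ _ (by omega) (by omega)
          rw [Nat.xor_xor_cancel_right, Nat.xor_zero] at e
          omega
        have hmin : ∀ j, j < i + 1 → ¬ b < j ^^^ a := by
          intro j hj
          rcases Nat.lt_or_ge j i with hji | hji
          · have hjh : j / 2 ^ s < b / 2 ^ s ^^^ a / 2 ^ s := by
              rw [Nat.div_lt_iff_lt_mul hpw]
              omega
            have := below_i_lt a b s j hsum hjh
            omega
          · have hji' : j = i := by omega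
            subst hji'
            have he : j ^^^ a = b := by
              rw [hia]
              exact Nat.xor_xor_cancel_right b a
            omega
        have h1 : Fmin a b ≤ i + 1 := Nat.find_le hP
        have h2 : ¬ Fmin a b < i + 1 := fun hlt => hmin _ hlt (Nat.find_spec (exF a b))
        unfold Fmin at h1 h2 ⊢
        omega
      · rw [if_neg hm00]
        rw [high_set_bit_eq m0, high_set_bit_eq n0]
        have hszpos : 1 ≤ Nat.size m0 := by
          rcases Nat.eq_zero_or_pos (Nat.size m0) with hz | hz
          · exact absurd (Nat.size_eq_zero.mp hz) hm00
          · omega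
        set k' := Nat.size m0 - 1 with hk'def
        have hsz' : Nat.size m0 = k' + 1 := by omega
        have hkt : ((Nat.size m0 : Int) - 1).toNat = k' := by omega
        have hszn : Nat.size n0 ≤ Nat.size m0 := Nat.size_le_size hn0m0
        rw [if_neg (show ¬ ((Nat.size n0 : Int) - 1 > (Nat.size m0 : Int) - 1) by omega)]
        rw [hkt]
        have hm0ub : m0 < 2 ^ (k' + 1) := by rw [← hsz']; exact Nat.lt_size_self m0
        have hm0lb : 2 ^ k' ≤ m0 := Nat.lt_size.mp (by omega)
        have hkls : k' < s := by
          have hle : Nat.size m0 ≤ s := Nat.size_le.mpr hm0lt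
          omega
        have hps2 : (2:ℕ) ^ (k' + 1) = 2 * 2 ^ k' := by ring
        have hXpos : (1:ℕ) < 2 ^ (s - k') := by
          have h1 : (2:ℕ) ^ 1 ≤ 2 ^ (s - k') := Nat.pow_le_pow_right (by norm_num) (by omega)
          omega
        have hnewm0 : m0 ^^^ 2 ^ k' = b % 2 ^ k' := by
          rw [xor_top m0 k' hm0lb hm0ub]
          have h1 : b % 2 ^ k' = m0 % 2 ^ k' := by
            rw [hm0]
            exact (Nat.mod_mod_of_dvd b (pow_dvd_pow 2 (le_of_lt hkls))).symm
          rw [h1, mod_top m0 k' hm0lb hm0ub]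
        have hm0div : m0 / 2 ^ k' = 1 := by
          have e1 : m0 = (m0 - 2 ^ k') + 2 ^ k' := by omega
          rw [e1, Nat.add_div_right _ (pow_pos (by norm_num : (0:ℕ) < 2) k'),
            Nat.div_eq_of_lt (by omega)]
        have hdivb : b / 2 ^ k' = (b / 2 ^ s) * 2 ^ (s - k') + 1 := by
          rw [div_pow_split b s k' (le_of_lt hkls), ← hm0, hm0div]
        have hss : (2:ℕ) ^ s = 2 ^ (s - k') * 2 ^ k' := by
          rw [← pow_add]; congr 1; omega
        rcases Nat.lt_or_ge (Nat.size n0) (Nat.size m0) with hlk | hge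
        · -- l < k
          rw [if_pos (show (Nat.size n0 : Int) - 1 < (Nat.size m0 : Int) - 1 by omega),
            if_neg (show ¬ ((Nat.size n0 : Int) - 1 = (Nat.size m0 : Int) - 1) by omega)]
          have hn0ub : n0 < 2 ^ k' := by
            have h1 := Nat.lt_size_self n0
            have h2 : (2:ℕ) ^ Nat.size n0 ≤ 2 ^ k' :=
              Nat.pow_le_pow_right (by norm_num) (by omega)
            omega
          have hdiva : a / 2 ^ k' = (a / 2 ^ s) * 2 ^ (s - k') + 0 := by
            rw [div_pow_split a s k' (le_of_lt hkls), ← hn0, Nat.div_eq_of_lt hn0ub]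
          have hnewn0 : n0 = a % 2 ^ k' := by
            have h1 : a % 2 ^ k' = n0 % 2 ^ k' := by
              rw [hn0]
              exact (Nat.mod_mod_of_dvd a (pow_dvd_pow 2 (le_of_lt hkls))).symm
            rw [h1, Nat.mod_eq_of_lt hn0ub]
          have hinew : i ||| 2 ^ k' = (b / 2 ^ k' ^^^ a / 2 ^ k') * 2 ^ k' := by
            rw [hdivb, hdiva]
            have hx : ((b / 2 ^ s) * 2 ^ (s - k') + 1) ^^^ ((a / 2 ^ s) * 2 ^ (s - k') + 0)
                = (b / 2 ^ s ^^^ a / 2 ^ s) * 2 ^ (s - k') + 1 := by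
              have h2 := xorBlock (s - k') (b / 2 ^ s) (a / 2 ^ s) 1 0 (by omega) (by omega)
              simpa using h2
            rw [hx]
            have e : ((b / 2 ^ s ^^^ a / 2 ^ s) * 2 ^ (s - k') + 1) * 2 ^ k'
                = (b / 2 ^ s ^^^ a / 2 ^ s) * 2 ^ s + 2 ^ k' := by
              rw [hss]; ring
            rw [e, hi]
            exact lor_pow _ s k' hkls
          have hsubnew : (a / 2 ^ k') &&& (b / 2 ^ k') = a / 2 ^ k' := by
            rw [hdiva, hdivb]
            have h2 := andBlock (s - k') (a / 2 ^ s) (b / 2 ^ s) 0 1 (by omega) (by omega)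
            rw [h2, hsubs]
            simp
          refine ih k' (i ||| 2 ^ k') (m0 ^^^ 2 ^ k') n0 ?_ hnewm0 hnewn0 hinew hsubnew
          rw [xor_top m0 k' hm0lb hm0ub]
          omega
        · -- l = k
          have hlk' : Nat.size n0 = Nat.size m0 := by omega
          rw [if_neg (show ¬ ((Nat.size n0 : Int) - 1 < (Nat.size m0 : Int) - 1) by omega),
            if_pos (show (Nat.size n0 : Int) - 1 = (Nat.size m0 : Int) - 1 by omega)]
          have hn0lb : 2 ^ k' ≤ n0 := Nat.lt_size.mp (by omega)
          have hn0ub2 : n0 < 2 ^ (k' + 1) := by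
            have h1 := Nat.lt_size_self n0
            rw [hlk', hsz'] at h1
            exact h1
          have hn0div : n0 / 2 ^ k' = 1 := by
            have e1 : n0 = (n0 - 2 ^ k') + 2 ^ k' := by omega
            rw [e1, Nat.add_div_right _ (pow_pos (by norm_num : (0:ℕ) < 2) k'),
              Nat.div_eq_of_lt (by omega)]
          have hdiva2 : a / 2 ^ k' = (a / 2 ^ s) * 2 ^ (s - k') + 1 := by
            rw [div_pow_split a s k' (le_of_lt hkls), ← hn0, hn0div]
          have hnewn0 : n0 ^^^ 2 ^ k' = a % 2 ^ k' := by
            rw [xor_top n0 k' hn0lb hn0ub2]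
            have h1 : a % 2 ^ k' = n0 % 2 ^ k' := by
              rw [hn0]
              exact (Nat.mod_mod_of_dvd a (pow_dvd_pow 2 (le_of_lt hkls))).symm
            rw [h1, mod_top n0 k' hn0lb hn0ub2]
          have hinew2 : i = (b / 2 ^ k' ^^^ a / 2 ^ k') * 2 ^ k' := by
            rw [hdivb, hdiva2]
            have hx : ((b / 2 ^ s) * 2 ^ (s - k') + 1) ^^^ ((a / 2 ^ s) * 2 ^ (s - k') + 1)
                = (b / 2 ^ s ^^^ a / 2 ^ s) * 2 ^ (s - k') + 0 := by
              have h2 := xorBlock (s - k') (b / 2 ^ s) (a / 2 ^ s) 1 1 (by omega) (by omega)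
              simpa using h2
            rw [hx]
            have e : ((b / 2 ^ s ^^^ a / 2 ^ s) * 2 ^ (s - k') + 0) * 2 ^ k'
                = (b / 2 ^ s ^^^ a / 2 ^ s) * 2 ^ s := by
              rw [hss]; ring
            rw [e, hi]
          have hsubnew2 : (a / 2 ^ k') &&& (b / 2 ^ k') = a / 2 ^ k' := by
            rw [hdiva2, hdivb]
            have h2 := andBlock (s - k') (a / 2 ^ s) (b / 2 ^ s) 1 1 (by omega) (by omega)
            rw [h2, hsubs]
            norm_num
          refine ih k' i (m0 ^^^ 2 ^ k') (n0 ^^^ 2 ^ k') ?_ hnewm0 hnewn0 hinew2 hsubnew2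
          rw [xor_top m0 k' hm0lb hm0ub]
          omega
    · rw [if_neg hcond]
      have hn0m0 : m0 < n0 := by omega
      have hPi : b < i ^^^ a := by omega
      have hmin : ∀ j, j < i → ¬ b < j ^^^ a := by
        intro j hj
        have hjh : j / 2 ^ s < b / 2 ^ s ^^^ a / 2 ^ s := by
          rw [Nat.div_lt_iff_lt_mul hpw]
          omega
        have := below_i_lt a b s j hsum hjh
        omega
      have h1 : Fmin a b ≤ i := Nat.find_le hPi
      have h2 : ¬ Fmin a b < i := fun hlt => hmin _ hlt (Nat.find_spec (exF a b))
      unfold Fmin at h1 h2 ⊢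
      omega

-- when n is a submask of m the loop always drains m0 and returns (m XOR n) + 1
lemma loopA_submask (a b : Nat) (hsub : a &&& b = a) :
    ∀ fuel s i m0 n0, m0 < fuel →
      m0 = b % 2 ^ s → n0 = a % 2 ^ s →
      i = (b / 2 ^ s ^^^ a / 2 ^ s) * 2 ^ s →
      loopA a b fuel i m0 n0 = (b ^^^ a) + 1 := by
  intro fuel
  induction fuel with
  | zero =>
    intro s i m0 n0 h1 _ _ _
    exact absurd h1 (Nat.not_lt_zero m0)
  | succ f ih =>
    intro s i m0 n0 hfuel hm0 hn0 hi
    have hpw : (0:ℕ) < 2 ^ s := pow_pos (by norm_num) s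
    have hbm : b = b / 2 ^ s * 2 ^ s + m0 := by rw [hm0]; exact split_block b s
    have ham : a = a / 2 ^ s * 2 ^ s + n0 := by rw [hn0]; exact split_block a s
    have hm0lt : m0 < 2 ^ s := by rw [hm0]; exact Nat.mod_lt _ hpw
    have hn0lt : n0 < 2 ^ s := by rw [hn0]; exact Nat.mod_lt _ hpw
    have hlosub : n0 &&& m0 = n0 := by
      rw [hm0, hn0, ← mod_pow_and, hsub]
    have hn0m0 : n0 ≤ m0 := by
      have h1 : n0 &&& m0 ≤ m0 := Nat.and_le_right
      omega
    have hi0 : i = (b / 2 ^ s ^^^ a / 2 ^ s) * 2 ^ s + 0 := by omega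
    have hixa : i ^^^ a = (b / 2 ^ s) * 2 ^ s + n0 := by
      calc i ^^^ a
          = ((b / 2 ^ s ^^^ a / 2 ^ s) * 2 ^ s + 0) ^^^ (a / 2 ^ s * 2 ^ s + n0) := by
            rw [← hi0, ← ham]
        _ = ((b / 2 ^ s ^^^ a / 2 ^ s) ^^^ a / 2 ^ s) * 2 ^ s + (0 ^^^ n0) :=
            xorBlock s _ _ 0 n0 hpw hn0lt
        _ = (b / 2 ^ s) * 2 ^ s + n0 := by rw [Nat.xor_xor_cancel_right, Nat.zero_xor]
    simp only [loopA]
    rw [if_pos (show (i ^^^ a) ≤ b by omega)]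
    by_cases hm00 : m0 = 0
    · rw [if_pos hm00]
      have hn00 : n0 = 0 := by omega
      have hia : i = b ^^^ a := by
        have hba : b ^^^ a = (b / 2 ^ s ^^^ a / 2 ^ s) * 2 ^ s + 0 := by
          calc b ^^^ a = (b / 2 ^ s * 2 ^ s + 0) ^^^ (a / 2 ^ s * 2 ^ s + 0) := by
                rw [show b / 2 ^ s * 2 ^ s + 0 = b by omega,
                  show a / 2 ^ s * 2 ^ s + 0 = a by omega]
            _ = (b / 2 ^ s ^^^ a / 2 ^ s) * 2 ^ s + (0 ^^^ 0) :=
                xorBlock s _ _ _ _ (by omega) (by omega)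
            _ = (b / 2 ^ s ^^^ a / 2 ^ s) * 2 ^ s + 0 := by simp
        omega
      omega
    · rw [if_neg hm00]
      rw [high_set_bit_eq m0, high_set_bit_eq n0]
      have hszpos : 1 ≤ Nat.size m0 := by
        rcases Nat.eq_zero_or_pos (Nat.size m0) with hz | hz
        · exact absurd (Nat.size_eq_zero.mp hz) hm00
        · omega
      set k' := Nat.size m0 - 1 with hk'def
      have hsz' : Nat.size m0 = k' + 1 := by omega
      have hkt : ((Nat.size m0 : Int) - 1).toNat = k' := by omega
      have hszn : Nat.size n0 ≤ Nat.size m0 := Nat.size_le_size hn0m0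
      rw [if_neg (show ¬ ((Nat.size n0 : Int) - 1 > (Nat.size m0 : Int) - 1) by omega)]
      rw [hkt]
      have hm0ub : m0 < 2 ^ (k' + 1) := by rw [← hsz']; exact Nat.lt_size_self m0
      have hm0lb : 2 ^ k' ≤ m0 := Nat.lt_size.mp (by omega)
      have hkls : k' < s := by
        have hle : Nat.size m0 ≤ s := Nat.size_le.mpr hm0lt
        omega
      have hps2 : (2:ℕ) ^ (k' + 1) = 2 * 2 ^ k' := by ring
      have hXpos : (1:ℕ) < 2 ^ (s - k') := by
        have h1 : (2:ℕ) ^ 1 ≤ 2 ^ (s - k') := Nat.pow_le_pow_right (by norm_num) (by omega)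
        omega
      have hnewm0 : m0 ^^^ 2 ^ k' = b % 2 ^ k' := by
        rw [xor_top m0 k' hm0lb hm0ub]
        have h1 : b % 2 ^ k' = m0 % 2 ^ k' := by
          rw [hm0]
          exact (Nat.mod_mod_of_dvd b (pow_dvd_pow 2 (le_of_lt hkls))).symm
        rw [h1, mod_top m0 k' hm0lb hm0ub]
      have hm0div : m0 / 2 ^ k' = 1 := by
        have e1 : m0 = (m0 - 2 ^ k') + 2 ^ k' := by omega
        rw [e1, Nat.add_div_right _ (pow_pos (by norm_num : (0:ℕ) < 2) k'),
          Nat.div_eq_of_lt (by omega)]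
      have hdivb : b / 2 ^ k' = (b / 2 ^ s) * 2 ^ (s - k') + 1 := by
        rw [div_pow_split b s k' (le_of_lt hkls), ← hm0, hm0div]
      have hss : (2:ℕ) ^ s = 2 ^ (s - k') * 2 ^ k' := by
        rw [← pow_add]; congr 1; omega
      rcases Nat.lt_or_ge (Nat.size n0) (Nat.size m0) with hlk | hge
      · rw [if_pos (show (Nat.size n0 : Int) - 1 < (Nat.size m0 : Int) - 1 by omega),
          if_neg (show ¬ ((Nat.size n0 : Int) - 1 = (Nat.size m0 : Int) - 1) by omega)]
        have hn0ub : n0 < 2 ^ k' := by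
          have h1 := Nat.lt_size_self n0
          have h2 : (2:ℕ) ^ Nat.size n0 ≤ 2 ^ k' :=
            Nat.pow_le_pow_right (by norm_num) (by omega)
          omega
        have hdiva : a / 2 ^ k' = (a / 2 ^ s) * 2 ^ (s - k') + 0 := by
          rw [div_pow_split a s k' (le_of_lt hkls), ← hn0, Nat.div_eq_of_lt hn0ub]
        have hnewn0 : n0 = a % 2 ^ k' := by
          have h1 : a % 2 ^ k' = n0 % 2 ^ k' := by
            rw [hn0]
            exact (Nat.mod_mod_of_dvd a (pow_dvd_pow 2 (le_of_lt hkls))).symm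
          rw [h1, Nat.mod_eq_of_lt hn0ub]
        have hinew : i ||| 2 ^ k' = (b / 2 ^ k' ^^^ a / 2 ^ k') * 2 ^ k' := by
          rw [hdivb, hdiva]
          have hx : ((b / 2 ^ s) * 2 ^ (s - k') + 1) ^^^ ((a / 2 ^ s) * 2 ^ (s - k') + 0)
              = (b / 2 ^ s ^^^ a / 2 ^ s) * 2 ^ (s - k') + 1 := by
            have h2 := xorBlock (s - k') (b / 2 ^ s) (a / 2 ^ s) 1 0 (by omega) (by omega)
            simpa using h2
          rw [hx]
          have e : ((b / 2 ^ s ^^^ a / 2 ^ s) * 2 ^ (s - k') + 1) * 2 ^ k'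
              = (b / 2 ^ s ^^^ a / 2 ^ s) * 2 ^ s + 2 ^ k' := by
            rw [hss]; ring
          rw [e, hi]
          exact lor_pow _ s k' hkls
        refine ih k' (i ||| 2 ^ k') (m0 ^^^ 2 ^ k') n0 ?_ hnewm0 hnewn0 hinew
        rw [xor_top m0 k' hm0lb hm0ub]
        omega
      · have hlk' : Nat.size n0 = Nat.size m0 := by omega
        rw [if_neg (show ¬ ((Nat.size n0 : Int) - 1 < (Nat.size m0 : Int) - 1) by omega),
          if_pos (show (Nat.size n0 : Int) - 1 = (Nat.size m0 : Int) - 1 by omega)]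
        have hn0lb : 2 ^ k' ≤ n0 := Nat.lt_size.mp (by omega)
        have hn0ub2 : n0 < 2 ^ (k' + 1) := by
          have h1 := Nat.lt_size_self n0
          rw [hlk', hsz'] at h1
          exact h1
        have hn0div : n0 / 2 ^ k' = 1 := by
          have e1 : n0 = (n0 - 2 ^ k') + 2 ^ k' := by omega
          rw [e1, Nat.add_div_right _ (pow_pos (by norm_num : (0:ℕ) < 2) k'),
            Nat.div_eq_of_lt (by omega)]
        have hdiva2 : a / 2 ^ k' = (a / 2 ^ s) * 2 ^ (s - k') + 1 := by
          rw [div_pow_split a s k' (le_of_lt hkls), ← hn0, hn0div]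
        have hnewn0 : n0 ^^^ 2 ^ k' = a % 2 ^ k' := by
          rw [xor_top n0 k' hn0lb hn0ub2]
          have h1 : a % 2 ^ k' = n0 % 2 ^ k' := by
            rw [hn0]
            exact (Nat.mod_mod_of_dvd a (pow_dvd_pow 2 (le_of_lt hkls))).symm
          rw [h1, mod_top n0 k' hn0lb hn0ub2]
        have hinew2 : i = (b / 2 ^ k' ^^^ a / 2 ^ k') * 2 ^ k' := by
          rw [hdivb, hdiva2]
          have hx : ((b / 2 ^ s) * 2 ^ (s - k') + 1) ^^^ ((a / 2 ^ s) * 2 ^ (s - k') + 1)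
              = (b / 2 ^ s ^^^ a / 2 ^ s) * 2 ^ (s - k') + 0 := by
            have h2 := xorBlock (s - k') (b / 2 ^ s) (a / 2 ^ s) 1 1 (by omega) (by omega)
            simpa using h2
          rw [hx]
          have e : ((b / 2 ^ s ^^^ a / 2 ^ s) * 2 ^ (s - k') + 0) * 2 ^ k'
              = (b / 2 ^ s ^^^ a / 2 ^ s) * 2 ^ s := by
            rw [hss]; ring
          rw [e, hi]
        refine ih k' i (m0 ^^^ 2 ^ k') (n0 ^^^ 2 ^ k') ?_ hnewm0 hnewn0 hinew2
        rw [xor_top m0 k' hm0lb hm0ub]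
        omega

-- entering the loop from the real initial state
lemma solve_nat_eq (a b : Nat) (hab : a ≤ b)
    (hND : a &&& b = a → a &&& ((b ^^^ (b + 1)) / 2) = 0) :
    loopA a b (b + 1) 0 b a = Fmin a b := by
  have hblt : b < 2 ^ Nat.size b := Nat.lt_size_self b
  have halt : a < 2 ^ Nat.size b := Nat.lt_of_le_of_lt hab hblt
  refine loopA_inv a b hND (b + 1) (Nat.size b) 0 b a (by omega) ?_ ?_ ?_ ?_
  · exact (Nat.mod_eq_of_lt hblt).symm
  · exact (Nat.mod_eq_of_lt halt).symm
  · rw [Nat.div_eq_of_lt hblt, Nat.div_eq_of_lt halt]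
    simp
  · rw [Nat.div_eq_of_lt hblt, Nat.div_eq_of_lt halt]
    simp

lemma solve_nat_submask (a b : Nat) (hsub : a &&& b = a) :
    loopA a b (b + 1) 0 b a = (b ^^^ a) + 1 := by
  have hab : a ≤ b := by
    have h1 : a &&& b ≤ b := Nat.and_le_right
    omega
  have hblt : b < 2 ^ Nat.size b := Nat.lt_size_self b
  have halt : a < 2 ^ Nat.size b := Nat.lt_of_le_of_lt hab hblt
  refine loopA_submask a b hsub (b + 1) (Nat.size b) 0 b a (by omega) ?_ ?_ ?_
  · exact (Nat.mod_eq_of_lt hblt).symm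
  · exact (Nat.mod_eq_of_lt halt).symm
  · rw [Nat.div_eq_of_lt hblt, Nat.div_eq_of_lt halt]
    simp

-- inside D the returned (m XOR n) + 1 fails the defining predicate, so it cannot be Fmin
lemma submask_bad (a b : Nat)
    (hT : a &&& ((b ^^^ (b + 1)) / 2) ≠ 0) :
    ((b ^^^ a) + 1) ^^^ a ≤ b := by
  have hxs := xor_succ b
  set t := Nat.find (exTO b) with htdef
  have hpt : (0:ℕ) < 2 ^ t := pow_pos (by norm_num) t
  have hpt1 : (2:ℕ) ^ (t + 1) = 2 * 2 ^ t := by ring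
  have hdiv2 : ((2:ℕ) ^ (t + 1) - 1) / 2 = 2 ^ t - 1 := by omega
  rw [hxs, hdiv2] at hT
  obtain ⟨q0, hq0, _⟩ := Nat.exists_most_significant_bit hT
  rw [Nat.testBit_land, Nat.testBit_two_pow_sub_one] at hq0
  have hqa : a.testBit q0 = true := by
    cases h : a.testBit q0
    · rw [h] at hq0; simp at hq0
    · rfl
  have hqt : q0 < t := by
    rcases Nat.lt_or_ge q0 t with h | h
    · exact h
    · rw [decide_eq_false (show ¬ q0 < t by omega)] at hq0
      simp at hq0
  have hexc : ∃ q, a.testBit q = true ∧ q < t := ⟨q0, hqa, hqt⟩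
  set c := Nat.find hexc with hcdef
  obtain ⟨hc1, hc2⟩ := Nat.find_spec hexc
  have hcmin : ∀ q, q < c → a.testBit q = false := by
    intro q hq
    have h' := Nat.find_min hexc hq
    cases h : a.testBit q
    · rfl
    · exact absurd ⟨h, by omega⟩ h'
  have hblow : ∀ q, q ≤ c → b.testBit q = true := fun q hq => TO_lt b q (by omega)
  have hpc : (0:ℕ) < 2 ^ c := pow_pos (by norm_num) c
  have hpcc : (2:ℕ) ^ (c + 1) = 2 * 2 ^ c := by ring
  have hbmod : b % 2 ^ (c + 1) = 2 ^ (c + 1) - 1 := by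
    apply Nat.eq_of_testBit_eq
    intro q
    rw [Nat.testBit_mod_two_pow, Nat.testBit_two_pow_sub_one]
    by_cases hq : q < c + 1
    · rw [decide_eq_true hq, hblow q (by omega), Bool.and_true]
    · rw [decide_eq_false hq, Bool.false_and]
  have hamod : a % 2 ^ (c + 1) = 2 ^ c := by
    apply Nat.eq_of_testBit_eq
    intro q
    rw [Nat.testBit_mod_two_pow, Nat.testBit_two_pow]
    rcases Nat.lt_trichotomy q c with h | h | h
    · rw [decide_eq_true (show q < c + 1 by omega), hcmin q h, Bool.and_false,
        decide_eq_false (show ¬ c = q by omega)]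
    · rw [h, decide_eq_true (show c < c + 1 by omega), hc1, Bool.and_true,
        decide_eq_true (rfl : c = c)]
    · rw [decide_eq_false (show ¬ q < c + 1 by omega), Bool.false_and,
        decide_eq_false (show ¬ c = q by omega)]
  have hbB : b = b / 2 ^ (c + 1) * 2 ^ (c + 1) + (2 ^ (c + 1) - 1) := by
    have := split_block b (c + 1)
    omega
  have haA : a = a / 2 ^ (c + 1) * 2 ^ (c + 1) + 2 ^ c := by
    have := split_block a (c + 1)
    omega
  have hxba : b ^^^ a
      = (b / 2 ^ (c + 1) ^^^ a / 2 ^ (c + 1)) * 2 ^ (c + 1) + (2 ^ c - 1) := by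
    calc b ^^^ a
        = (b / 2 ^ (c + 1) * 2 ^ (c + 1) + (2 ^ (c + 1) - 1)) ^^^
          (a / 2 ^ (c + 1) * 2 ^ (c + 1) + 2 ^ c) := by rw [← hbB, ← haA]
      _ = (b / 2 ^ (c + 1) ^^^ a / 2 ^ (c + 1)) * 2 ^ (c + 1)
          + ((2 ^ (c + 1) - 1) ^^^ 2 ^ c) := xorBlock (c + 1) _ _ _ _ (by omega) (by omega)
      _ = _ := by rw [succpred_xor_pow]
  have hx1 : (b ^^^ a) + 1
      = (b / 2 ^ (c + 1) ^^^ a / 2 ^ (c + 1)) * 2 ^ (c + 1) + 2 ^ c := by omega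
  have hfinal : ((b ^^^ a) + 1) ^^^ a
      = (b / 2 ^ (c + 1)) * 2 ^ (c + 1) + 0 := by
    calc ((b ^^^ a) + 1) ^^^ a
        = ((b / 2 ^ (c + 1) ^^^ a / 2 ^ (c + 1)) * 2 ^ (c + 1) + 2 ^ c) ^^^
          (a / 2 ^ (c + 1) * 2 ^ (c + 1) + 2 ^ c) := by rw [← hx1, ← haA]
      _ = ((b / 2 ^ (c + 1) ^^^ a / 2 ^ (c + 1)) ^^^ a / 2 ^ (c + 1)) * 2 ^ (c + 1)
          + (2 ^ c ^^^ 2 ^ c) := xorBlock (c + 1) _ _ _ _ (by omega) (by omega)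
      _ = _ := by rw [Nat.xor_xor_cancel_right, Nat.xor_self]
  omega

-- ===== VERDICT (by name: the statement is the Claim_ definition above) =====
theorem solve_spec : Claim_unchanged_solve := by
  intro n m _hdom hpre
  unfold Spec_solve
  intro hnd
  unfold solve solve_alt
  by_cases hmn : m < n
  · rw [if_pos hmn, if_pos hmn]
  · rw [if_neg hmn, if_neg hmn]
    have h0nm : 0 ≤ n ∧ 0 ≤ m := by
      rcases hpre with h | h
      · exact absurd h hmn
      · exact h
    have hab : n.toNat ≤ m.toNat := Int.toNat_le_toNat (not_lt.mp hmn)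
    have hND : n.toNat &&& m.toNat = n.toNat →
        n.toNat &&& ((m.toNat ^^^ (m.toNat + 1)) / 2) = 0 := by
      intro hs
      by_contra hne
      exact hnd ⟨h0nm.1, h0nm.2, hs, hne⟩
    rw [solve_nat_eq n.toNat m.toNat hab hND, bit_length_eq,
      foldB_correct n.toNat m.toNat hab]

theorem solve_changed : Claim_changed_solve := by
  unfold Claim_changed_solve
  decide

theorem solve_tight : Claim_exact_solve := by
  intro n m _hdom _hpre hd
  obtain ⟨h0n, h0m, hsub, hT⟩ := hd
  have hab : n.toNat ≤ m.toNat := by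
    have h1 : n.toNat &&& m.toNat ≤ m.toNat := Nat.and_le_right
    omega
  have hmn : ¬ m < n := by omega
  unfold solve solve_alt
  rw [if_neg hmn, if_neg hmn]
  rw [solve_nat_submask n.toNat m.toNat hsub, bit_length_eq,
    foldB_correct n.toNat m.toNat hab]
  have hbad := submask_bad n.toNat m.toNat hT
  have hgood : m.toNat < Fmin n.toNat m.toNat ^^^ n.toNat := Nat.find_spec (exF n.toNat m.toNat)
  have hne : (m.toNat ^^^ n.toNat) + 1 ≠ Fmin n.toNat m.toNat := by
    intro he
    rw [← he] at hgood
    omega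
  have hred : (match some (Fmin n.toNat m.toNat) with
      | some b => (b : Int)
      | none => 0) = ((Fmin n.toNat m.toNat : Nat) : Int) := rfl
  rw [hred]
  intro he
  exact hne (by exact_mod_cast he)
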